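-- pv_equiv track=rewrite | github.com/camilavib00/KdP | uebung_3_baselly_prahst.py | lovedDigits
-- ===== SOURCE A (Python) =====
-- def lovedDigits(num):
--     #rekursionsanker
--     if num == 0:
--         return 0
--     #rekursionsschritt
--     rest = num % 10
--     num //= 10
--     if (rest == 0): #2
--         verliebte_zahl = 0
--     else: #1
--         verliebte_zahl = 10 - rest
--     return lovedDigits(num) * 10 + verliebte_zahl
-- ===== SOURCE B (Python) =====
-- def lovedDigits(num):
--     result = 0
--     place = 1
--     while num > 0:
--         d = num % 10
--         result += (0 if d == 0 else 10 - d) * place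
--         place *= 10
--         num //= 10
--     return result
-- ===== Notes on version B (the rewrite author's own statement) =====
-- stated objective: simpler
-- what changed: Replaces the recursive digit build-up with a single iterative loop accumulating each transformed digit at its place value.
import Mathlib
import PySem

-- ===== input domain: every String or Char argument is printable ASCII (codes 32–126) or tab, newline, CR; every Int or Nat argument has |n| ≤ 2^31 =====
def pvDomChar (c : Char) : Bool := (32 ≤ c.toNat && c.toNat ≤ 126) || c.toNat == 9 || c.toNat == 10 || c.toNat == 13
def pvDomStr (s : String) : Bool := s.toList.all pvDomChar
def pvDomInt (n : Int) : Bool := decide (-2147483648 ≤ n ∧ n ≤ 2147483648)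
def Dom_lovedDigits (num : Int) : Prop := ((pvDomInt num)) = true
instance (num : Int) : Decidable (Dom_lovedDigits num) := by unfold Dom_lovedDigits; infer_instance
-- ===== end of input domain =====

-- B replaces A's recursion with a single accumulating loop (objective: simpler decomposition).

-- ===== PORT A =====
-- A's recursion diverges for negative num (num //= 10 never reaches 0); the fuel
-- num.toNat + 1 is always sufficient on Pre_ (0 ≤ num), where the port is exact.
def lovedDigitsFuel : Nat → Int → Int
  | 0, _ => 0
  | f + 1, num =>
    if num = 0 then 0
    else
      let rest := PySem.Int.mod num 10
      let num' := PySem.Int.floordiv num 10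
      let verliebte := if rest = 0 then (0 : Int) else 10 - rest
      lovedDigitsFuel f num' * 10 + verliebte

def lovedDigits (num : Int) : Int := lovedDigitsFuel (num.toNat + 1) num

-- ===== PORT B =====
theorem pvFloordivTen_toNat_lt (num : Int) (h : 0 < num) :
    (PySem.Int.floordiv num 10).toNat < num.toNat := by
  rw [PySem.Int.floordiv_eq_ediv_of_pos (by omega)]
  omega

def lovedDigitsLoop (num result place : Int) : Int :=
  if h : 0 < num then
    let d := PySem.Int.mod num 10
    lovedDigitsLoop (PySem.Int.floordiv num 10)
      (result + (if d = 0 then (0 : Int) else 10 - d) * place) (place * 10)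
  else result
termination_by num.toNat
decreasing_by exact pvFloordivTen_toNat_lt num h

def lovedDigits_alt (num : Int) : Int := lovedDigitsLoop num 0 1

-- ===== PRECONDITION & SPEC =====
-- Pre_ excludes negative num, on which A recurses forever (RecursionError).
def Pre_lovedDigits (num : Int) : Prop := 0 ≤ num
instance (num : Int) : Decidable (Pre_lovedDigits num) := by unfold Pre_lovedDigits; infer_instance
def pvWitness_lovedDigits : Int := (907)

def Spec_lovedDigits (num : Int) (out : Int) : Prop := out = lovedDigits_alt num
instance (num : Int) (out : Int) : Decidable (Spec_lovedDigits num out) := by unfold Spec_lovedDigits; infer_instance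

-- ===== CLAIM =====
def Claim_equal_lovedDigits : Prop := ∀ (num : Int), Dom_lovedDigits num → Pre_lovedDigits num → Spec_lovedDigits num (lovedDigits num)

-- ===== LEMMAS AND PROOFS =====

-- loop invariant: for 0 ≤ num with enough fuel, the loop computes result + place * A-value
theorem loop_eq_fuel (f : Nat) : ∀ (num result place : Int), 0 ≤ num → num.toNat < f →
    lovedDigitsLoop num result place = result + place * lovedDigitsFuel f num := by
  induction f with
  | zero => intro num _ _ _ h; omega
  | succ f ih =>
    intro num result place hnn hf
    rw [lovedDigitsLoop, lovedDigitsFuel]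
    by_cases h0 : num = 0
    · subst h0; simp
    · have hpos : 0 < num := by omega
      simp only [hpos, dif_pos, if_neg h0]
      have hd : 0 ≤ PySem.Int.floordiv num 10 := by
        rw [PySem.Int.floordiv_eq_ediv_of_pos (by omega)]; omega
      have hlt := pvFloordivTen_toNat_lt num hpos
      rw [ih (PySem.Int.floordiv num 10) _ _ hd (by omega)]
      ring

-- ===== VERDICT =====
theorem lovedDigits_spec : Claim_equal_lovedDigits := by
  intro num _ hpre
  unfold Spec_lovedDigits lovedDigits lovedDigits_alt
  rw [loop_eq_fuel (num.toNat + 1) num 0 1 hpre (by omega)]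
  ring
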